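-- pv_equiv track=rewrite | github.com/NickRaymondKurtansky/GitMSK | textMachineLearningFeatures_20190903.py | clinical_dx_section
-- ===== SOURCE A (Python) =====
-- def clinical_dx_section(string):
--     # pinpoint start of clinical dx section
--     s_start = string.find('clinical diagnosis')
--     string = string[s_start: ]
--     string = string.replace('clinical diagnosis & history:', '')
--     string = string.replace('clinical diagnosis and history:', '')
--     string = string.strip()
--
--     # pinpoint end of clinical dx section
--     EndIndex = [len(string)]
--     # add to this list of words signalling end of secion
--     clinDxEnds = ['specimens submitted', 'cytologic diagnosis', 'lmp:']
--     for e in clinDxEnds: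
--         EndIndex.append(string.find(e))
--     EndIndex = [e for e in EndIndex if e != -1]
--     EndIndex = min(EndIndex)
--
--     return(string[ :EndIndex].strip())
-- ===== SOURCE B (Python) =====
-- def clinical_dx_section(string):
--     # pinpoint start of clinical dx section (same prelude as A)
--     s_start = string.find('clinical diagnosis')
--     string = string[s_start:]
--     string = string.replace('clinical diagnosis & history:', '')
--     string = string.replace('clinical diagnosis and history:', '')
--     string = string.strip()
--
--     # end of section: one left-to-right pass, stop at the first position where
--     # any end-marker starts (instead of one full find() per marker + min)
--     markers = ('specimens submitted', 'cytologic diagnosis', 'lmp:')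
--     cut = len(string)
--     for i in range(len(string)):
--         if string.startswith(markers, i):
--             cut = i
--             break
--     return string[:cut].strip()
-- ===== Notes on version B (the rewrite author's own statement) =====
-- stated objective: alternative
-- what changed: A finds the section end by running string.find once per end marker and taking the min of the non-negative results; B makes a single left-to-right pass over the stripped string and stops at the first index where any end marker starts.
import Mathlib
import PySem

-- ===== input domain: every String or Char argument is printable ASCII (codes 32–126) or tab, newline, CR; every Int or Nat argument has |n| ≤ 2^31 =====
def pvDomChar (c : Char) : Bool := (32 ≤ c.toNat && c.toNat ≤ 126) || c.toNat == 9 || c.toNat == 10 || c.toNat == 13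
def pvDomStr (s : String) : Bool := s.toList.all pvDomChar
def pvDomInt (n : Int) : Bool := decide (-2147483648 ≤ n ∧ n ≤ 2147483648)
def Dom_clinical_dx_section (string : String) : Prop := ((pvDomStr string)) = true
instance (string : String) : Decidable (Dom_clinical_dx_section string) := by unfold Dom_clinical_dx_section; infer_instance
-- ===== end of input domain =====

-- B replaces A's one-find-per-end-marker + min with a single left-to-right scan that
-- stops at the first position where any end marker starts (objective: alternative; return value only).

-- ===== PORT A =====
def clinical_dx_section (string : String) : String :=
  let s_start := PySem.Str.find string "clinical diagnosis"
  let string := PySem.Str.slice string (some s_start) none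
  let string := PySem.Str.replace string "clinical diagnosis & history:" ""
  let string := PySem.Str.replace string "clinical diagnosis and history:" ""
  let string := PySem.Str.strip string
  let endIndex : List Int := [(PySem.Str.len string : Int)]
  let clinDxEnds : List String := ["specimens submitted", "cytologic diagnosis", "lmp:"]
  let endIndex := clinDxEnds.foldl (fun acc e => acc ++ [PySem.Str.find string e]) endIndex
  let endIndex := endIndex.filter (fun e => e != -1)
  let endIndexMin := (PySem.List.min? endIndex (fun x => x)).getD 0
  PySem.Str.strip (PySem.Str.slice string none (some endIndexMin))

-- ===== PORT B =====
def pvMarkers : List (List Char) :=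
  ["specimens submitted".toList, "cytologic diagnosis".toList, "lmp:".toList]

-- the 'for i in range(len(string)): if string.startswith(markers, i): break' loop,
-- as structural recursion over the suffixes of the string
def pvScan : List Char → Nat
  | [] => 0
  | c :: rest =>
      if pvMarkers.any (fun m => PySem.Chars.startswith (c :: rest) m) then 0
      else pvScan rest + 1

def clinical_dx_section_alt (string : String) : String :=
  let s_start := PySem.Str.find string "clinical diagnosis"
  let string := PySem.Str.slice string (some s_start) none
  let string := PySem.Str.replace string "clinical diagnosis & history:" ""
  let string := PySem.Str.replace string "clinical diagnosis and history:" ""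
  let string := PySem.Str.strip string
  let cut := pvScan string.toList
  PySem.Str.strip (PySem.Str.slice string none (some (cut : Int)))

-- ===== PRECONDITION & SPEC =====
def Spec_clinical_dx_section (string : String) (out : String) : Prop := out = clinical_dx_section_alt string
instance (string : String) (out : String) : Decidable (Spec_clinical_dx_section string out) := by unfold Spec_clinical_dx_section; infer_instance

-- ===== CLAIM (what is proved, stated in full; the proofs are below) =====
def Claim_equal_clinical_dx_section : Prop := ∀ (string : String), Dom_clinical_dx_section string → Spec_clinical_dx_section string (clinical_dx_section string)

-- ===== LEMMAS AND PROOFS =====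

lemma pvScan_le (cs : List Char) : pvScan cs ≤ cs.length := by
  induction cs with
  | nil => simp [pvScan]
  | cons c rest ih =>
      by_cases hyes : (pvMarkers.any (fun m => PySem.Chars.startswith (c :: rest) m)) = true
      · simp [pvScan, hyes]
      · have := ih
        simp [pvScan, hyes]
        omega

lemma pvScan_not_before (cs : List Char) (j : Nat) (hj : j < pvScan cs)
    (m : List Char) (hm : m ∈ pvMarkers) : ¬ m <+: cs.drop j := by
  induction cs generalizing j with
  | nil => simp [pvScan] at hj
  | cons c rest ih =>
      by_cases hyes : (pvMarkers.any (fun m => PySem.Chars.startswith (c :: rest) m)) = true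
      · simp [pvScan, hyes] at hj
      · simp [pvScan, hyes] at hj
        cases j with
        | zero =>
            intro hpre
            exact hyes (List.any_eq_true.mpr ⟨m, hm, (PySem.Chars.startswith_iff _ _).mpr hpre⟩)
        | succ j' =>
            simpa using ih j' (by omega)

lemma pvScan_match (cs : List Char) (h : pvScan cs < cs.length) :
    ∃ m ∈ pvMarkers, m <+: cs.drop (pvScan cs) := by
  induction cs with
  | nil => simp at h
  | cons c rest ih =>
      by_cases hyes : (pvMarkers.any (fun m => PySem.Chars.startswith (c :: rest) m)) = true
      · obtain ⟨m, hm, hpre⟩ := List.any_eq_true.mp hyes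
        refine ⟨m, hm, ?_⟩
        simp only [pvScan, hyes, if_true, List.drop_zero]
        exact (PySem.Chars.startswith_iff _ _).mp hpre
      · have h' : pvScan rest < rest.length := by
          simp [pvScan, hyes] at h
          omega
        obtain ⟨m, hm, hpre⟩ := ih h'
        refine ⟨m, hm, ?_⟩
        simp [pvScan, hyes]
        simpa using hpre

-- prefix at a dropped position gives an infix
lemma infix_of_prefix_drop {m cs : List Char} {j : Nat} (h : m <+: cs.drop j) : m <:+: cs :=
  h.isInfix.trans (List.drop_suffix j cs).isInfix

-- the scan result is a lower bound on every surviving entry of A's EndIndex list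
lemma scan_le_find (cs m : List Char) (hm : m ∈ pvMarkers)
    (hne : PySem.Chars.find cs m ≠ -1) : (pvScan cs : Int) ≤ PySem.Chars.find cs m := by
  have h0 : 0 ≤ PySem.Chars.find cs m := by
    have := PySem.Chars.neg_one_le_find cs m
    omega
  obtain ⟨hpre, -⟩ := PySem.Chars.find_spec h0
  by_contra hlt
  exact pvScan_not_before cs (PySem.Chars.find cs m).toNat (by omega) m hm hpre

-- the core fact: A's min over [len] ++ per-marker finds (with -1 dropped) IS B's scan result
lemma min_eq_scan (cs : List Char) :
    (PySem.List.min?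
        (((cs.length : Int) :: pvMarkers.map (fun m => PySem.Chars.find cs m)).filter
          (fun e => e != -1))
        (fun x => x)).getD 0 = (pvScan cs : Int) := by
  set L := (((cs.length : Int) :: pvMarkers.map (fun m => PySem.Chars.find cs m)).filter
      (fun e => e != -1)) with hL
  have hlenL : (cs.length : Int) ∈ L := by
    rw [hL]
    refine List.mem_filter.mpr ⟨List.mem_cons_self .., ?_⟩
    simp
  have hlow : ∀ e ∈ L, (pvScan cs : Int) ≤ e := by
    intro e he
    rw [hL] at he
    obtain ⟨hmem, hne⟩ := List.mem_filter.mp he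
    have hne' : e ≠ -1 := by simpa using hne
    rcases List.mem_cons.mp hmem with h | h
    · subst h
      exact_mod_cast pvScan_le cs
    · obtain ⟨m, hm, rfl⟩ := List.mem_map.mp h
      exact scan_le_find cs m hm hne'
  have hmemscan : (pvScan cs : Int) ∈ L := by
    rcases Nat.lt_or_ge (pvScan cs) cs.length with hlt | hge
    · obtain ⟨m, hm, hpre⟩ := pvScan_match cs hlt
      have hfnn : 0 ≤ PySem.Chars.find cs m :=
        (PySem.Chars.find_nonneg_iff cs m).mpr (infix_of_prefix_drop hpre)
      obtain ⟨-, hmin⟩ := PySem.Chars.find_spec hfnn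
      have hle : (PySem.Chars.find cs m).toNat ≤ pvScan cs := by
        by_contra hgt
        exact hmin (pvScan cs) (by omega) hpre
      have hge' : (pvScan cs : Int) ≤ PySem.Chars.find cs m :=
        scan_le_find cs m hm (by omega)
      have heq : PySem.Chars.find cs m = (pvScan cs : Int) := by omega
      rw [hL, ← heq]
      refine List.mem_filter.mpr ⟨List.mem_cons.mpr (Or.inr ?_), by simp; omega⟩
      exact List.mem_map.mpr ⟨m, hm, rfl⟩
    · have heq : pvScan cs = cs.length := le_antisymm (pvScan_le cs) hge
      rw [heq]
      exact hlenL
  obtain ⟨mn, hmn⟩ : ∃ mn, PySem.List.min? L (fun x => x) = some mn := by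
    cases h : PySem.List.min? L (fun x => x) with
    | none =>
        have : L = [] := (PySem.List.min?_eq_none_iff ..).mp h
        rw [this] at hlenL
        simp at hlenL
    | some mn => exact ⟨mn, rfl⟩
  have h1 : (pvScan cs : Int) ≤ mn := hlow mn (PySem.List.min?_mem hmn)
  have h2 : mn ≤ (pvScan cs : Int) := PySem.List.min?_isMin hmn _ hmemscan
  rw [hmn]
  simp
  omega

-- A's end-index computation, as written in the port, equals B's scan
lemma cut_eq (t : String) :
    (PySem.List.min?
        ((["specimens submitted", "cytologic diagnosis", "lmp:"].foldl
            (fun acc e => acc ++ [PySem.Str.find t e]) [(PySem.Str.len t : Int)]).filter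
          (fun e => e != -1))
        (fun x => x)).getD 0 = (pvScan t.toList : Int) := by
  have h := min_eq_scan t.toList
  rw [PySem.List.foldl_append_singleton_eq_map] at *
  simpa [pvMarkers] using h

-- ===== VERDICT (by name: the statement is the Claim_ definition above) =====
theorem clinical_dx_section_spec : Claim_equal_clinical_dx_section := by
  intro s _
  unfold Spec_clinical_dx_section clinical_dx_section clinical_dx_section_alt
  simp only [cut_eq]
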